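-- pv_equiv track=rewrite | github.com/jonhedson/nikola | nikola/plugins/command/import_wordpress.py | separate_qtranslate_content
-- ===== SOURCE A (Python) =====
-- def separate_qtranslate_content(text):
--     """Parse the content of a wordpress post or page and separate
--     the various language specific contents when they are delimited
--     with qtranslate tags: <!--:LL-->blabla<!--:-->"""
--     # TODO: uniformize qtranslate tags <!--/en--> => <!--:-->
--     qt_start = "<!--:"
--     qt_end = "-->"
--     qt_end_with_lang_len = 5
--     qt_chunks = text.split(qt_start)
--     content_by_lang = {}
--     common_txt_list = []
--     for c in qt_chunks:
--         if not c.strip():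
--             continue
--         if c.startswith(qt_end):
--             # just after the end of a language specific section, there may
--             # be some piece of common text or tags, or just nothing
--             lang = ""  # default language
--             c = c.lstrip(qt_end)
--             if not c:
--                 continue
--         elif c[2:].startswith(qt_end):
--             # a language specific section (with language code at the begining)
--             lang = c[:2]
--             c = c[qt_end_with_lang_len:]
--         else:
--             # nowhere specific (maybe there is no language section in the
--             # currently parsed content)
--             lang = ""  # default language
--         if not lang:
--             common_txt_list.append(c)
--             for l in content_by_lang.keys():
--                 content_by_lang[l].append(c)
--         else:
--             content_by_lang[lang] = content_by_lang.get(lang, common_txt_list) + [c]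
--     # in case there was no language specific section, just add the text
--     if common_txt_list and not content_by_lang:
--         content_by_lang[""] = common_txt_list
--     # Format back the list to simple text
--     for l in content_by_lang.keys():
--         content_by_lang[l] = " ".join(content_by_lang[l])
--     return content_by_lang
-- ===== SOURCE B (Python) =====
-- def separate_qtranslate_content(text):
--     """Parse qtranslate-tagged text into a per-language content dict.
--     Tokenize first into ordered (lang, chunk) pairs, then group."""
--     tokens = []
--     for c in text.split("<!--:"):
--         if not c.strip():
--             continue
--         if c.startswith("-->"):
--             c = c.lstrip("-->")
--             if c:
--                 tokens.append(("", c))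
--         elif c[2:].startswith("-->"):
--             tokens.append((c[:2], c[5:]))
--         else:
--             tokens.append(("", c))
--     langs = list(dict.fromkeys(lang for lang, _ in tokens if lang))
--     if not langs:
--         common = [c for _, c in tokens]
--         return {"": " ".join(common)} if common else {}
--     return {l: " ".join(c for lang, c in tokens if lang in ("", l))
--             for l in langs}
-- ===== Notes on version B (the rewrite author's own statement) =====
-- stated objective: alternative
-- what changed: B replaces A's single stateful pass (a dict of growing lists with commons cross-appended to every existing language and snapshotted into new ones) by a tokenize-then-group decomposition: first build an ordered list of (lang, chunk) tokens, then collect languages in order of first appearance and join, per language, the chunks that are common or belong to it.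
import Mathlib
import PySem

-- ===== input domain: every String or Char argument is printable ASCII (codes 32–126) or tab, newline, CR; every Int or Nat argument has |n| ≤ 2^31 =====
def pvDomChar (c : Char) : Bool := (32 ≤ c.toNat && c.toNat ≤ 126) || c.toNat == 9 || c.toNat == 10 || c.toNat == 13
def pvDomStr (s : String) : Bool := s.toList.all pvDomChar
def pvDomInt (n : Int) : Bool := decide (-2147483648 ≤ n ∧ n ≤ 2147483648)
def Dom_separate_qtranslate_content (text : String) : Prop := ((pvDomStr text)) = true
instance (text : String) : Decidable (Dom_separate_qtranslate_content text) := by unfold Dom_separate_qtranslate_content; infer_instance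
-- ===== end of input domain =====

-- B re-decomposes A's single stateful dict-building pass as tokenize-then-group
-- (alternative decomposition, same cost); return values proved equal on all inputs.

-- ===== PORT A =====

-- hand port of Python's c.lstrip("-->"): drop leading chars belonging to {'-','>'}
-- (exact: lstrip with a chars argument strips by character SET from the left)
def pvLstripArrows (c : String) : String :=
  String.ofList (c.toList.dropWhile (fun ch => ch == '-' || ch == '>'))

-- the body of A's `for c in qt_chunks` loop, on state (content_by_lang, common_txt_list)
def pvStepA (s : PySem.Dict String (List String) × List String) (c : String) :
    PySem.Dict String (List String) × List String :=
  if PySem.Str.strip c = "" then s                        -- if not c.strip(): continue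
  else if PySem.Str.startswith c "-->" then
    let c2 := pvLstripArrows c                            -- lang = ""; c = c.lstrip(qt_end)
    if c2 = "" then s                                     -- if not c: continue
    else                                                  -- common: append c to common list and to every dict value
      (PySem.Dict.mk (s.1.items.map (fun kv => (kv.1, kv.2 ++ [c2]))), s.2 ++ [c2])
  else if PySem.Str.startswith (PySem.Str.slice c (some 2) none) "-->" then
    let lang := PySem.Str.slice c none (some 2)           -- lang = c[:2]
    let c2 := PySem.Str.slice c (some 5) none             -- c = c[qt_end_with_lang_len:]
    (s.1.insert lang (s.1.getD lang s.2 ++ [c2]), s.2)    -- d[lang] = d.get(lang, common) + [c]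
  else                                                    -- lang = "": common text
    (PySem.Dict.mk (s.1.items.map (fun kv => (kv.1, kv.2 ++ [c]))), s.2 ++ [c])

def separate_qtranslate_content (text : String) : List (String × String) :=
  let qt_chunks := (PySem.Str.split? text "<!--:").getD []   -- separator is non-empty, split? is `some`
  let st := qt_chunks.foldl pvStepA (PySem.Dict.empty, [])
  let d := if st.2 ≠ [] ∧ st.1.items = [] then st.1.insert "" st.2 else st.1
  (d.items.map (fun kv => (kv.1, PySem.Str.join " " kv.2)))  -- " ".join, keys in insertion order

-- ===== PORT B =====

-- B's tokenizer: classify one chunk into `none` (skipped) or some (lang, text)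
def pvClassify (c : String) : Option (String × String) :=
  if PySem.Str.strip c = "" then none
  else if PySem.Str.startswith c "-->" then
    let c2 := pvLstripArrows c
    if c2 = "" then none else some ("", c2)
  else if PySem.Str.startswith (PySem.Str.slice c (some 2) none) "-->" then
    some (PySem.Str.slice c none (some 2), PySem.Str.slice c (some 5) none)
  else some ("", c)

def separate_qtranslate_content_alt (text : String) : List (String × String) :=
  let tokens := ((PySem.Str.split? text "<!--:").getD []).filterMap pvClassify
  let langs := PySem.List.dedup ((tokens.map (·.1)).filter (fun l => l != ""))  -- dict.fromkeys order
  if langs = [] then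
    let common := tokens.map (·.2)
    if common = [] then [] else [("", PySem.Str.join " " common)]
  else
    langs.map (fun l =>
      (l, PySem.Str.join " " ((tokens.filter (fun t => t.1 == "" || t.1 == l)).map (·.2))))

-- ===== PRECONDITION & SPEC =====
def Spec_separate_qtranslate_content (text : String) (out : List (String × String)) : Prop := out = separate_qtranslate_content_alt text
instance (text : String) (out : List (String × String)) : Decidable (Spec_separate_qtranslate_content text out) := by unfold Spec_separate_qtranslate_content; infer_instance

-- ===== CLAIM (what is proved, stated in full; the proofs are below) =====
def Claim_equal_separate_qtranslate_content : Prop := ∀ (text : String), Dom_separate_qtranslate_content text → Spec_separate_qtranslate_content text (separate_qtranslate_content text)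

-- ===== LEMMAS AND PROOFS =====

-- the languages of a token list, distinct, in order of first appearance
def pvLangsOf (ts : List (String × String)) : List String :=
  PySem.Set.ofList ((ts.map (·.1)).filter (fun l => l != ""))

-- the chunk texts visible to language l (common ones and l's own), in order
def pvGrp (ts : List (String × String)) (l : String) : List String :=
  (ts.filter (fun t => t.1 == "" || t.1 == l)).map (·.2)

-- the common chunk texts
def pvCommon (ts : List (String × String)) : List String :=
  (ts.filter (fun t => t.1 == "")).map (·.2)

-- the dict A has built after consuming tokens ts
def pvG (ts : List (String × String)) : List (String × List String) :=
  (pvLangsOf ts).map (fun l => (l, pvGrp ts l))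

lemma pvGet?_mk_map {α : Type} (L : List String) (f : String → α) (x : String) (hx : x ∈ L) :
    (PySem.Dict.mk (L.map (fun l => (l, f l)))).get? x = some (f x) := by
  induction L with
  | nil => cases hx
  | cons a L ih =>
    by_cases hax : a = x
    · subst hax
      simp only [PySem.Dict.get?, List.map_cons]
      rw [List.find?_cons_of_pos (by simp)]
      rfl
    · have hx' : x ∈ L := by
        rcases List.mem_cons.mp hx with h | h
        · exact absurd h.symm hax
        · exact h
      have := ih hx'
      simp only [PySem.Dict.get?, List.map_cons] at this ⊢
      rw [List.find?_cons_of_neg (by simp [hax])]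
      exact this

lemma pvLang_ne_empty (c : String)
    (h : PySem.Str.startswith (PySem.Str.slice c (some 2) none) "-->" = true) :
    PySem.Str.slice c none (some 2) ≠ "" := by
  intro hemp
  have h2 : (2:Int) = ((2:Nat):Int) := by norm_num
  have hnil : c.toList.take 2 = [] := by
    have := congrArg String.toList hemp
    rw [PySem.Str.toList_slice, PySem.Chars.slice_eq_listSlice, h2,
        PySem.List.slice_to_natCast] at this
    simpa using this
  have hcnil : c.toList = [] := by
    cases hc : c.toList with
    | nil => rfl
    | cons a t => rw [hc] at hnil; simp [List.take] at hnil
  rw [PySem.Str.startswith_eq, PySem.Str.toList_slice,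
    PySem.Chars.slice_eq_listSlice, hcnil] at h
  exact absurd h (by decide)

lemma pvLangsOf_append (ts : List (String × String)) (t : String × String) :
    pvLangsOf (ts ++ [t]) =
      if t.1 = "" then pvLangsOf ts
      else if t.1 ∈ pvLangsOf ts then pvLangsOf ts else pvLangsOf ts ++ [t.1] := by
  unfold pvLangsOf
  by_cases h : t.1 = ""
  · simp [h]
  · have hb : (t.1 != "") = true := by simp [h]
    rw [List.map_append, List.filter_append]
    simp only [List.map_cons, List.map_nil, List.filter_cons, hb, if_true, List.filter_nil]
    rw [PySem.Set.ofList_append_singleton]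
    by_cases hm : t.1 ∈ PySem.Set.ofList ((ts.map (·.1)).filter (fun l => l != ""))
    · rw [PySem.Set.add_of_mem hm]; simp [h, hm]
    · rw [PySem.Set.add_of_not_mem hm]; simp [h, hm]

lemma pvGrp_append (ts : List (String × String)) (t : String × String) (l : String) :
    pvGrp (ts ++ [t]) l = pvGrp ts l ++ (if t.1 == "" || t.1 == l then [t.2] else []) := by
  unfold pvGrp
  rw [List.filter_append, List.map_append]
  by_cases h : (t.1 == "" || t.1 == l) = true
  · simp [h]
  · simp [h]

lemma pvCommon_append (ts : List (String × String)) (t : String × String) :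
    pvCommon (ts ++ [t]) = pvCommon ts ++ (if t.1 = "" then [t.2] else []) := by
  unfold pvCommon
  rw [List.filter_append, List.map_append]
  by_cases h : t.1 = "" <;> simp [h]

-- if a language never occurs in ts, its group is just the common text
lemma pvGrp_of_not_mem (ts : List (String × String)) (l : String)
    (_hl : l ≠ "") (h : l ∉ pvLangsOf ts) : pvGrp ts l = pvCommon ts := by
  unfold pvGrp pvCommon
  congr 1
  apply List.filter_congr
  intro t ht
  by_cases h1 : t.1 = ""
  · simp [h1]
  · have : t.1 ≠ l := by
      intro he
      apply h
      unfold pvLangsOf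
      rw [PySem.Set.mem_ofList]
      refine List.mem_filter.mpr ⟨List.mem_map.mpr ⟨t, ht, he⟩, by simp [← he, h1]⟩
    simp [h1, this]

-- one token updates A's state exactly as pvG/pvCommon predict
lemma pvStep_token (ts : List (String × String)) (t : String × String) :
    (if t.1 = ""
      then ((PySem.Dict.mk ((PySem.Dict.mk (pvG ts)).items.map (fun kv => (kv.1, kv.2 ++ [t.2])))),
            pvCommon ts ++ [t.2])
      else ((PySem.Dict.mk (pvG ts)).insert t.1
              ((PySem.Dict.mk (pvG ts)).getD t.1 (pvCommon ts) ++ [t.2]), pvCommon ts))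
    = (PySem.Dict.mk (pvG (ts ++ [t])), pvCommon (ts ++ [t])) := by
  by_cases h : t.1 = ""
  · simp only [h, pvCommon_append]
    refine congrArg (fun x => (PySem.Dict.mk x, pvCommon ts ++ [t.2])) ?_
    unfold pvG
    rw [pvLangsOf_append, if_pos h, List.map_map]
    apply List.map_congr_left
    intro l _
    simp [Function.comp, pvGrp_append, h]
  · rw [if_neg h, pvCommon_append, if_neg h, List.append_nil]
    refine Prod.ext ?_ rfl
    apply PySem.Dict.ext
    by_cases hm : t.1 ∈ pvLangsOf ts
    · have hc : (PySem.Dict.mk (pvG ts)).contains t.1 = true := by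
        unfold pvG
        rw [PySem.Dict.contains_mk]
        simp only [List.any_map, List.any_eq_true]
        exact ⟨t.1, hm, by simp⟩
      have hget : (PySem.Dict.mk (pvG ts)).getD t.1 (pvCommon ts) = pvGrp ts t.1 := by
        unfold pvG
        rw [PySem.Dict.getD_eq_get?_getD, pvGet?_mk_map _ _ _ hm]; rfl
      rw [hget, PySem.Dict.items_insert_of_contains _ _ hc]
      show (pvG ts).map _ = pvG (ts ++ [t])
      unfold pvG
      rw [pvLangsOf_append, if_neg h, if_pos hm, List.map_map]
      apply List.map_congr_left
      intro l _
      by_cases hl : l = t.1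
      · subst hl; simp [Function.comp, pvGrp_append]
      · simp [Function.comp, pvGrp_append, h, hl, Ne.symm hl]
    · have hc : (PySem.Dict.mk (pvG ts)).contains t.1 = false := by
        unfold pvG
        rw [PySem.Dict.contains_mk]
        simp only [List.any_map, List.any_eq_false, Function.comp]
        intro l hlm
        exact fun he => hm ((beq_iff_eq.mp he) ▸ hlm)
      have hget : (PySem.Dict.mk (pvG ts)).getD t.1 (pvCommon ts) = pvCommon ts := by
        exact PySem.Dict.getD_of_not_contains _ _ hc
      rw [hget, PySem.Dict.items_insert_of_not_contains _ _ hc]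
      show pvG ts ++ [(t.1, pvCommon ts ++ [t.2])] = pvG (ts ++ [t])
      unfold pvG
      rw [pvLangsOf_append, if_neg h, if_neg hm, List.map_append]
      congr 1
      · apply List.map_congr_left
        intro l hlm
        have hne : t.1 ≠ l := fun he => hm (he ▸ hlm)
        simp [pvGrp_append, h, hne]
      · simp only [List.map_cons, List.map_nil]
        rw [pvGrp_append]
        have : pvGrp ts t.1 = pvCommon ts := pvGrp_of_not_mem ts t.1 h hm
        simp [this]

-- A's loop body = classify, then apply the token (or skip)
lemma pvStepA_eq_classify (s : PySem.Dict String (List String) × List String) (c : String) :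
    pvStepA s c =
      Option.elim (pvClassify c) s (fun t =>
        if t.1 = ""
          then (PySem.Dict.mk (s.1.items.map (fun kv => (kv.1, kv.2 ++ [t.2]))), s.2 ++ [t.2])
          else (s.1.insert t.1 (s.1.getD t.1 s.2 ++ [t.2]), s.2)) := by
  unfold pvStepA pvClassify
  by_cases h1 : PySem.Str.strip c = ""
  · rw [if_pos h1, if_pos h1]; rfl
  · rw [if_neg h1, if_neg h1]
    by_cases h2 : PySem.Str.startswith c "-->" = true
    · rw [if_pos h2, if_pos h2]
      by_cases h3 : pvLstripArrows c = ""
      · rw [if_pos h3, if_pos h3]; rfl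
      · rw [if_neg h3, if_neg h3]; simp
    · rw [if_neg h2, if_neg h2]
      by_cases h4 : PySem.Str.startswith (PySem.Str.slice c (some 2) none) "-->" = true
      · rw [if_pos h4, if_pos h4]
        simp [pvLang_ne_empty c h4]
      · rw [if_neg h4, if_neg h4]; simp

-- loop invariant: folding A's body over chunks tracks pvG / pvCommon of the tokens seen
lemma pvLoop_inv (cs : List String) (ts : List (String × String)) :
    cs.foldl pvStepA (PySem.Dict.mk (pvG ts), pvCommon ts)
      = (PySem.Dict.mk (pvG (ts ++ cs.filterMap pvClassify)),
         pvCommon (ts ++ cs.filterMap pvClassify)) := by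
  induction cs generalizing ts with
  | nil => simp
  | cons c cs ih =>
    rw [List.foldl_cons, pvStepA_eq_classify]
    cases hc : pvClassify c with
    | none =>
      rw [Option.elim_none, ih ts]
      simp [hc]
    | some t =>
      rw [Option.elim_some]
      have hstep := pvStep_token ts t
      rw [hstep, ih (ts ++ [t])]
      simp [hc]

-- when no language occurs, every token is common
lemma pvCommon_of_no_langs (ts : List (String × String)) (h : pvLangsOf ts = []) :
    pvCommon ts = ts.map (·.2) := by
  unfold pvCommon
  have hall : ∀ t ∈ ts, t.1 = "" := by
    intro t ht
    by_contra hne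
    have : t.1 ∈ pvLangsOf ts := by
      unfold pvLangsOf
      rw [PySem.Set.mem_ofList]
      exact List.mem_filter.mpr ⟨List.mem_map.mpr ⟨t, ht, rfl⟩, by simp [hne]⟩
    rw [h] at this; cases this
  rw [List.filter_eq_self.mpr (fun t ht => by simp [hall t ht])]

-- ===== VERDICT (by name: the statement is the Claim_ definition above) =====
theorem separate_qtranslate_content_spec : Claim_equal_separate_qtranslate_content := by
  intro text _
  show separate_qtranslate_content text = separate_qtranslate_content_alt text
  simp only [separate_qtranslate_content, separate_qtranslate_content_alt]
  set cs := (PySem.Str.split? text "<!--:").getD [] with hcs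
  set ts := cs.filterMap pvClassify with hts
  have hloop : cs.foldl pvStepA (PySem.Dict.empty, []) = (PySem.Dict.mk (pvG ts), pvCommon ts) := by
    have h0 : (PySem.Dict.empty : PySem.Dict String (List String)) = PySem.Dict.mk (pvG []) := rfl
    have h1 : ([] : List String) = pvCommon [] := rfl
    rw [h0, h1, pvLoop_inv cs []]
    exact Prod.ext rfl rfl
  rw [hloop]
  rw [show PySem.List.dedup ((ts.map (·.1)).filter (fun l => l != "")) = pvLangsOf ts from
    PySem.List.dedup_eq_ofList _]
  by_cases hl : pvLangsOf ts = []
  · have hg : pvG ts = [] := by unfold pvG; rw [hl]; rfl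
    have hmap : ts.map (·.2) = pvCommon ts := (pvCommon_of_no_langs ts hl).symm
    rw [if_pos hl]
    by_cases hcom : pvCommon ts = []
    · have hc2 : ts.map (·.2) = [] := by rw [hmap, hcom]
      rw [if_pos hc2]
      rw [if_neg (by intro h; exact h.1 hcom)]
      simp [hg]
    · have hc2 : ¬ ts.map (·.2) = [] := by rw [hmap]; exact hcom
      rw [if_neg hc2]
      rw [if_pos ⟨hcom, by simp [hg]⟩]
      rw [PySem.Dict.items_insert_of_not_contains _ _ (by simp [hg, PySem.Dict.contains_mk])]
      simp [hg, hmap]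
  · have hg : ¬ pvG ts = [] := by
      unfold pvG
      intro h
      exact hl (List.map_eq_nil_iff.mp h)
    rw [if_neg hl]
    rw [if_neg (by intro h; exact hg (by simpa using h.2))]
    unfold pvG
    rw [List.map_map]
    rfl
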